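-- pv_equiv track=rewrite | github.com/data-yeon/DataScienceFundamentals | hanghae99/0_club99/day6_1.py | should_ring_bell
-- ===== SOURCE A (Python) =====
-- def should_ring_bell(repeat_num, cards):
--     betting_table = {}
--
--     # 카드 정보를 누적
--     for kind, value in cards:
--         if kind in betting_table:
--             betting_table[kind] += value
--         else:
--             betting_table[kind] = value
--
--     # 과일 종류 중 개수가 정확히 5개인 경우가 있는지 확인
--     for count in betting_table.values():
--         if count == 5:
--             return "YES"
--
--     return "NO"
-- ===== SOURCE B (Python) =====
-- def should_ring_bell(repeat_num, cards):
--     # Per-kind filter-sum over first-occurrence distinct kinds; no accumulator dict.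
--     kinds = list(dict.fromkeys(k for k, _ in cards))
--     return "YES" if any(sum(v for k, v in cards if k == kind) == 5 for kind in kinds) else "NO"
-- ===== Notes on version B (the rewrite author's own statement) =====
-- stated objective: alternative
-- what changed: Replaces the accumulator dict plus a scan over its values by a dedup of the kinds and a per-kind filter-and-sum checked with any().
import Mathlib
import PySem

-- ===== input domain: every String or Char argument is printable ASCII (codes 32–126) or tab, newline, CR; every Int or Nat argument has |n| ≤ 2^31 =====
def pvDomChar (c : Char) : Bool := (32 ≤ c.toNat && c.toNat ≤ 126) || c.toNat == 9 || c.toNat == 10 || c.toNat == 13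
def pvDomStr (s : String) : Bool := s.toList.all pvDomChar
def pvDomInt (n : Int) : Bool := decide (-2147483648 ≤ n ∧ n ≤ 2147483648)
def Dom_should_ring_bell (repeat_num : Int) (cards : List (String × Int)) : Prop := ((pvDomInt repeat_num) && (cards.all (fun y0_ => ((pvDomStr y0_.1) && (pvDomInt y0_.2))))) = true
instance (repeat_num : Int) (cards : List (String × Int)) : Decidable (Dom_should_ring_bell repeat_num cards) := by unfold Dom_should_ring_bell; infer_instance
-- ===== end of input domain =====

-- B replaces A's accumulator dict + values scan by a dedup of the kinds and a per-kind
-- filter-and-sum checked with any() (alternative decomposition, same return value).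

-- ===== PORT A =====
-- the dict-accumulation step: betting_table[kind] += value / betting_table[kind] = value
def srbStep (d : PySem.Dict String Int) (kv : String × Int) : PySem.Dict String Int :=
  if d.contains kv.1 then d.modify kv.1 0 (· + kv.2) else d.insert kv.1 kv.2

-- the second loop: return "YES" on the first count == 5, else fall through to "NO"
def srbScan : List Int → String
  | [] => "NO"
  | c :: rest => if c == 5 then "YES" else srbScan rest

def should_ring_bell (repeat_num : Int) (cards : List (String × Int)) : String :=
  srbScan ((cards.foldl srbStep PySem.Dict.empty).values)

-- ===== PORT B =====
def should_ring_bell_alt (repeat_num : Int) (cards : List (String × Int)) : String :=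
  let kinds := PySem.List.dedup (cards.map (·.1))
  if kinds.any (fun kind =>
      ((cards.filter (fun c => c.1 == kind)).map (·.2)).sum == 5) then "YES" else "NO"

-- ===== PRECONDITION & SPEC =====
def Spec_should_ring_bell (repeat_num : Int) (cards : List (String × Int)) (out : String) : Prop := out = should_ring_bell_alt repeat_num cards
instance (repeat_num : Int) (cards : List (String × Int)) (out : String) : Decidable (Spec_should_ring_bell repeat_num cards out) := by unfold Spec_should_ring_bell; infer_instance

-- ===== CLAIM (what is proved, stated in full; the proofs are below) =====
def Claim_equal_should_ring_bell : Prop := ∀ (repeat_num : Int) (cards : List (String × Int)), Dom_should_ring_bell repeat_num cards → Spec_should_ring_bell repeat_num cards (should_ring_bell repeat_num cards)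

-- ===== LEMMAS AND PROOFS =====

-- the per-kind total B computes
def srbSum (x : String) (l : List (String × Int)) : Int :=
  ((l.filter (fun c => c.1 == x)).map (·.2)).sum

theorem srbSum_cons (x : String) (k : String) (v : Int) (l : List (String × Int)) :
    srbSum x ((k, v) :: l) = if k = x then v + srbSum x l else srbSum x l := by
  simp [srbSum, List.filter_cons]
  split_ifs with h
  · simp
  · rfl

theorem getD_srbStep (d : PySem.Dict String Int) (k : String) (v : Int) (x : String) :
    (srbStep d (k, v)).getD x 0 = if k = x then d.getD x 0 + v else d.getD x 0 := by
  unfold srbStep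
  by_cases hc : d.contains k = true
  · simp only [hc, if_true]
    rw [PySem.Dict.getD_modify]
    split_ifs with h1 h2 h2
    · rw [h1]
    · exact absurd h1.symm h2
    · exact absurd h2.symm h1
    · rfl
  · simp only [hc, if_false, Bool.false_eq_true]
    rw [PySem.Dict.getD_insert]
    split_ifs with h1 h2 h2
    · subst h1
      rw [PySem.Dict.getD_of_not_contains d 0 (by simpa using hc), zero_add]
    · exact absurd h1.symm h2
    · exact absurd h2.symm h1
    · rfl

theorem getD_srbFold (l : List (String × Int)) (d : PySem.Dict String Int) (x : String) :
    (l.foldl srbStep d).getD x 0 = d.getD x 0 + srbSum x l := by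
  induction l generalizing d with
  | nil => simp [srbSum]
  | cons p rest ih =>
    obtain ⟨k, v⟩ := p
    rw [List.foldl_cons, ih, getD_srbStep, srbSum_cons]
    split_ifs <;> ring

theorem mem_keys_srbStep (d : PySem.Dict String Int) (p : String × Int) (x : String) :
    x ∈ (srbStep d p).keys ↔ x = p.1 ∨ x ∈ d.keys := by
  unfold srbStep
  split_ifs with hc
  · rw [PySem.Dict.keys_modify]; exact PySem.Dict.mem_keys_insert ..
  · exact PySem.Dict.mem_keys_insert ..

theorem mem_keys_srbFold (l : List (String × Int)) (d : PySem.Dict String Int) (x : String) :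
    x ∈ (l.foldl srbStep d).keys ↔ x ∈ d.keys ∨ x ∈ l.map (·.1) := by
  induction l generalizing d with
  | nil => simp
  | cons p rest ih =>
    rw [List.foldl_cons, ih, mem_keys_srbStep]
    simp only [List.map_cons, List.mem_cons]
    tauto

theorem nodup_keys_srbFold (l : List (String × Int)) (d : PySem.Dict String Int)
    (h : d.keys.Nodup) : (l.foldl srbStep d).keys.Nodup := by
  induction l generalizing d with
  | nil => exact h
  | cons p rest ih =>
    rw [List.foldl_cons]
    apply ih
    unfold srbStep
    by_cases hc : d.contains p.1 = true
    · rw [if_pos hc, PySem.Dict.keys_modify, PySem.Dict.keys_insert_of_contains d _ hc]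
      exact h
    · rw [if_neg (by simp [hc]), PySem.Dict.keys_insert_of_not_contains d p.2 (by simpa using hc)]
      refine List.Nodup.append h (List.nodup_singleton _) ?_
      intro a ha hb
      simp only [List.mem_singleton] at hb
      exact absurd ((PySem.Dict.contains_iff_mem_keys d p.1).mpr (hb ▸ ha)) (by simp [hc])

theorem srbScan_eq (vs : List Int) :
    srbScan vs = if 5 ∈ vs then "YES" else "NO" := by
  induction vs with
  | nil => simp [srbScan]
  | cons c rest ih =>
    unfold srbScan
    by_cases h : c = 5
    · simp [h]
    · simp [h, ih, Ne.symm h]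

theorem srb_mem_values (cards : List (String × Int)) :
    5 ∈ (cards.foldl srbStep PySem.Dict.empty).values ↔
      (PySem.List.dedup (cards.map (·.1))).any (fun kind =>
        ((cards.filter (fun c => c.1 == kind)).map (·.2)).sum == 5) = true := by
  have hnd : (cards.foldl srbStep PySem.Dict.empty).keys.Nodup :=
    nodup_keys_srbFold _ _ (by simp [PySem.Dict.keys_empty])
  rw [PySem.Dict.values_eq_map_keys _ hnd 0]
  simp only [List.any_eq_true, PySem.List.mem_dedup, beq_iff_eq]
  constructor
  · intro h
    obtain ⟨k, hk, hv⟩ := List.mem_map.mp h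
    rw [getD_srbFold, PySem.Dict.getD_empty, zero_add] at hv
    rw [mem_keys_srbFold] at hk
    rcases hk with hk | hk
    · simp [PySem.Dict.keys_empty] at hk
    · exact ⟨k, hk, hv⟩
  · rintro ⟨k, hk, hv⟩
    refine List.mem_map.mpr ⟨k, (mem_keys_srbFold _ _ _).mpr (Or.inr (hk)), ?_⟩
    rw [getD_srbFold, PySem.Dict.getD_empty, zero_add]
    exact hv

-- ===== VERDICT (by name: the statement is the Claim_ definition above) =====
theorem should_ring_bell_spec : Claim_equal_should_ring_bell := by
  intro repeat_num cards _
  unfold Spec_should_ring_bell should_ring_bell should_ring_bell_alt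
  rw [srbScan_eq]
  by_cases h : 5 ∈ (cards.foldl srbStep PySem.Dict.empty).values
  · rw [if_pos h, if_pos ((srb_mem_values cards).mp h)]
  · rw [if_neg h, if_neg (fun hb => h ((srb_mem_values cards).mpr hb))]
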